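-- pv_equiv track=rewrite | github.com/TrioDW/PNU_CSE_study | Introduction to Computers and Programming(2022spring)/reference/2021 final_exam/2021_final_5(2).py | Deep_Rotate
-- ===== SOURCE A (Python) =====
-- def Deep_Rotate(La):
--
--     La_len = []
--     result = []
--
--     for i in range(len(La)):
--         La_len.append(len(La[i]))
--     La = sum(La, [])
--
--     temp = []
--     temp.append(La[1:])
--     temp.append([La[0]])
--     temp = sum(temp, [])
--
--     s = 0
--     for i in La_len:
--         result.append(temp[s:s+i])
--         s += i
--     return result
-- ===== SOURCE B (Python) =====
-- def Deep_Rotate(La):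
--     # carry-based rotation: no flattening, no length bookkeeping, no slicing offsets.
--     # carry = the element that wraps around (the overall first element);
--     # walking the rows from last to first, each nonempty row becomes
--     # row[1:] + [carry] and donates its own head as the new carry.
--     carry = next(x for sub in La for x in sub)
--     out = []
--     for sub in reversed(La):
--         if sub:
--             out.append(sub[1:] + [carry])
--             carry = sub[0]
--         else:
--             out.append([])
--     out.reverse()
--     return out
-- ===== Notes on version B (the rewrite author's own statement) =====
-- stated objective: faster
-- what changed: Instead of flattening with sum(La, []) (quadratic repeated concatenation), rotating the flat list and re-slicing it by a separately collected length table, B keeps the nested shape and does one reverse pass threading a single carry element: each nonempty row becomes row[1:]+[carry] and donates its head as the new carry.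
-- outside the precondition, e.g. on Deep_Rotate([]): A raises IndexError, B raises StopIteration
import Mathlib
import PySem

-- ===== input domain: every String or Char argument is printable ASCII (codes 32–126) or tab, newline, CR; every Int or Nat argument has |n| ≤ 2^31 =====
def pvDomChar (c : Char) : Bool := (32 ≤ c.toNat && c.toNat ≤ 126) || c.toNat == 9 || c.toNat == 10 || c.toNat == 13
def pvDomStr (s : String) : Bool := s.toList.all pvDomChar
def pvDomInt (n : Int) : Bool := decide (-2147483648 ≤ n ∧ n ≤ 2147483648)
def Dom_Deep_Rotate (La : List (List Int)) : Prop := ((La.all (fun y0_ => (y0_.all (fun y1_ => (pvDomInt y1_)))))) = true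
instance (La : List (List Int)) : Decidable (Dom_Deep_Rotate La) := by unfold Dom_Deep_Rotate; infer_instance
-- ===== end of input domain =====

-- B replaces A's flatten (quadratic sum(La, [])) / rotate / re-slice-by-length-table pipeline
-- by a single reverse pass over the rows threading one carry element (measured faster).
-- ===== PORT A =====
def Deep_Rotate (La : List (List Int)) : List (List Int) :=
  -- for i in range(len(La)): La_len.append(len(La[i]))
  let La_len : List Int :=
    (PySem.List.pyRange 0 (La.length : Int) 1).foldl
      (fun acc i => acc ++ [((PySem.List.pyGetD La i []).length : Int)]) []
  -- La = sum(La, [])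
  let flat : List Int := La.foldl (fun acc sub => acc ++ sub) []
  -- temp = La[1:] + [La[0]]   (La[0] raises IndexError on an empty flat list: excluded by Pre_)
  let temp : List Int := PySem.List.slice flat (some 1) none ++ [PySem.List.pyGetD flat 0 0]
  -- s = 0; for i in La_len: result.append(temp[s:s+i]); s += i
  (La_len.foldl
    (fun (st : List (List Int) × Int) i =>
      (st.1 ++ [PySem.List.slice temp (some st.2) (some (st.2 + i))], st.2 + i))
    ([], 0)).1

-- ===== PORT B =====
-- next(x for sub in La for x in sub): first element of the first nonempty row
def pvFirstElem : List (List Int) → Option Int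
  | [] => none
  | [] :: rest => pvFirstElem rest
  | (x :: _) :: _ => some x

def Deep_Rotate_alt (La : List (List Int)) : List (List Int) :=
  -- carry = next(x for sub in La for x in sub)  (raises StopIteration if none: excluded by Pre_)
  let carry0 : Int := (pvFirstElem La).getD 0
  -- for sub in reversed(La): …
  let step := fun (st : List (List Int) × Int) (sub : List Int) =>
    match sub with
    | [] => (st.1 ++ [([] : List Int)], st.2)
    | x :: r => (st.1 ++ [r ++ [st.2]], x)
  -- out.reverse(); return out
  ((La.reverse.foldl step ([], carry0)).1).reverse

-- ===== PRECONDITION & SPEC =====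
-- A raises IndexError (La[0] on the flattened empty list) when every row is empty; exactly those inputs are excluded.
def Pre_Deep_Rotate (La : List (List Int)) : Prop := ∃ sub ∈ La, sub ≠ []
instance (La : List (List Int)) : Decidable (Pre_Deep_Rotate La) := by
  unfold Pre_Deep_Rotate; infer_instance

def pvWitness_Deep_Rotate : List (List Int) := [[1, 2], [3]]

def Spec_Deep_Rotate (La : List (List Int)) (out : List (List Int)) : Prop := out = Deep_Rotate_alt La
instance (La : List (List Int)) (out : List (List Int)) : Decidable (Spec_Deep_Rotate La out) := by unfold Spec_Deep_Rotate; infer_instance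

-- ===== CLAIM (what is proved, stated in full; the proofs are below) =====
def Claim_equal_Deep_Rotate : Prop := ∀ (La : List (List Int)), Dom_Deep_Rotate La → Pre_Deep_Rotate La → Spec_Deep_Rotate La (Deep_Rotate La)

-- ===== LEMMAS AND PROOFS =====

-- pvRegroup t La: cut t into consecutive blocks with the row lengths of La
def pvRegroup : List Int → List (List Int) → List (List Int)
  | _, [] => []
  | t, sub :: rest => t.take sub.length :: pvRegroup (t.drop sub.length) rest

-- recursive form of B's reverse-carry pass
def pvRotB : Int → List (List Int) → List (List Int) × Int
  | c, [] => ([], c)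
  | c, sub :: rest =>
      let p := pvRotB c rest
      match sub with
      | [] => ([] :: p.1, p.2)
      | x :: r => ((r ++ [p.2]) :: p.1, x)

theorem pv_foldl_append_flat (La : List (List Int)) :
    ∀ acc, La.foldl (fun acc sub => acc ++ sub) acc = acc ++ La.flatMap id := by
  induction La with
  | nil => simp
  | cons sub rest ih => intro acc; simp [List.foldl_cons, ih, List.flatMap_cons]

theorem pv_sliceFold (temp : List Int) (La : List (List Int)) :
    ∀ (acc : List (List Int)) (s : Nat),
      ((La.map (fun sub => ((sub.length : Int)))).foldl
        (fun (st : List (List Int) × Int) i =>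
          (st.1 ++ [PySem.List.slice temp (some st.2) (some (st.2 + i))], st.2 + i))
        (acc, (s : Int))).1
      = acc ++ pvRegroup (temp.drop s) La := by
  induction La with
  | nil => intro acc s; simp [pvRegroup]
  | cons sub rest ih =>
    intro acc s
    have hslice : PySem.List.slice temp (some (s : Int)) (some ((s : Int) + (sub.length : Int)))
        = (temp.drop s).take sub.length := PySem.List.slice_natCast_add temp s sub.length
    have hcast : (s : Int) + (sub.length : Int) = ((s + sub.length : Nat) : Int) := by push_cast; ring
    simp only [List.map_cons, List.foldl_cons]
    rw [hslice, hcast, ih (acc ++ [(temp.drop s).take sub.length]) (s + sub.length)]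
    simp [pvRegroup, List.drop_drop]

theorem pv_take_one_headD (l : List Int) (h : l ≠ []) : l.take 1 = [l.headD 0] := by
  cases l with
  | nil => exact absurd rfl h
  | cons x xs => simp

theorem pv_rotB_spec (c : Int) (La : List (List Int)) :
    (pvRotB c La).1 = pvRegroup ((La.flatMap id ++ [c]).tail) La
    ∧ (pvRotB c La).2 = (La.flatMap id ++ [c]).headD 0 := by
  induction La with
  | nil => simp [pvRotB, pvRegroup]
  | cons sub rest ih =>
    obtain ⟨ih1, ih2⟩ := ih
    cases sub with
    | nil =>
      refine ⟨?_, ?_⟩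
      · simp [pvRotB, pvRegroup, ih1]
      · simpa [pvRotB] using ih2
    | cons x r =>
      have hassoc : ((x :: r) ++ rest.flatMap id) ++ [c] = x :: (r ++ (rest.flatMap id ++ [c])) := by
        simp
      refine ⟨?_, ?_⟩
      · simp only [pvRotB, List.flatMap_cons, id, hassoc, List.tail_cons, pvRegroup,
          List.length_cons, ih1, ih2]
        rw [List.take_append, List.drop_append,
          show r.length + 1 - r.length = 1 by omega,
          List.take_of_length_le (by omega), List.drop_eq_nil_of_le (by omega),
          pv_take_one_headD (rest.flatMap id ++ [c]) (by simp),
          List.drop_one, List.nil_append]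
      · simp [pvRotB]

-- B's reverse-foldl pass equals the recursive carry pass (rows in reverse order)
theorem pv_foldB (La : List (List Int)) (c : Int) :
    La.reverse.foldl
      (fun (st : List (List Int) × Int) (sub : List Int) =>
        match sub with
        | [] => (st.1 ++ [([] : List Int)], st.2)
        | x :: r => (st.1 ++ [r ++ [st.2]], x))
      ([], c)
    = ((pvRotB c La).1.reverse, (pvRotB c La).2) := by
  rw [List.foldl_reverse]
  induction La with
  | nil => simp [pvRotB]
  | cons sub rest ih =>
    cases sub with
    | nil => simp [List.foldr_cons, ih, pvRotB]
    | cons x r => simp [List.foldr_cons, ih, pvRotB]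

theorem pv_firstElem_eq (La : List (List Int)) : pvFirstElem La = (La.flatMap id).head? := by
  induction La with
  | nil => simp [pvFirstElem]
  | cons sub rest ih =>
    cases sub with
    | nil => simpa [pvFirstElem] using ih
    | cons x r => simp [pvFirstElem]

-- A's La_len loop produces the list of row lengths
theorem pv_lens_eq (La : List (List Int)) :
    (PySem.List.pyRange 0 (La.length : Int) 1).foldl
      (fun acc i => acc ++ [((PySem.List.pyGetD La i []).length : Int)]) []
    = La.map (fun sub => ((sub.length : Int))) := by
  rw [PySem.List.foldl_pyRange_zero_pyGetD' La []
        (fun (acc : List Int) (v : List Int) => acc ++ [(v.length : Int)]) []]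
  rw [PySem.List.foldl_append_singleton_eq_map]
  rfl

-- ===== VERDICT (by name: the statement is the Claim_ definition above) =====
theorem Deep_Rotate_spec : Claim_equal_Deep_Rotate := by
  intro La _ hpre
  unfold Spec_Deep_Rotate Deep_Rotate Deep_Rotate_alt
  have hflatne : La.flatMap id ≠ [] := by
    obtain ⟨sub, hmem, hne⟩ := hpre
    cases sub with
    | nil => exact absurd rfl hne
    | cons x r =>
      intro h
      have : x ∈ La.flatMap id := List.mem_flatMap.2 ⟨x :: r, hmem, by simp⟩
      simp [h] at this
  -- A side
  rw [pv_lens_eq, pv_foldl_append_flat La []]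
  simp only [List.nil_append]
  have hA := pv_sliceFold
    (PySem.List.slice (La.flatMap id) (some 1) none ++ [PySem.List.pyGetD (La.flatMap id) 0 0]) La [] 0
  simp only [Nat.cast_zero, List.nil_append, List.drop_zero] at hA
  rw [hA]
  -- B side
  rw [pv_foldB, List.reverse_reverse]
  rw [(pv_rotB_spec _ La).1, pv_firstElem_eq]
  -- both are pvRegroup of the same rotated flat list
  cases hf : La.flatMap id with
  | nil => exact absurd hf hflatne
  | cons x xs =>
    simp [PySem.List.slice_from_one, PySem.List.pyGetD_zero, hf]
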